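-- pv_equiv track=rewrite | github.com/raniabt1978/ma-document-intelligence | analyzers/inconsistency_detector.py | _same_financial_metric
-- ===== SOURCE A (Python) =====
-- def _same_financial_metric(text1: str, text2: str) -> bool:
--     """Check if two financial facts discuss the same metric"""
--     metric_keywords = ['revenue', 'sales', 'inventory', 'assets', 'debt', 'liabilities']
--
--     text1_lower = text1.lower()
--     text2_lower = text2.lower()
--
--     for keyword in metric_keywords:
--         if keyword in text1_lower and keyword in text2_lower:
--             return True
--
--     return False
-- ===== SOURCE B (Python) =====
-- def _same_financial_metric(text1: str, text2: str) -> bool: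
--     """Check if two financial facts discuss the same metric"""
--     metric_keywords = ['revenue', 'sales', 'inventory', 'assets', 'debt', 'liabilities']
--
--     # dispatch table: first character -> keywords starting with it
--     by_first = {}
--     for k in metric_keywords:
--         by_first.setdefault(k[0], []).append(k)
--
--     def found_in(text):
--         # single left-to-right scan: at each position try only the keywords
--         # whose first character matches, collecting every keyword that occurs
--         t = text.lower()
--         found = set()
--         for i, c in enumerate(t):
--             for k in by_first.get(c, []):
--                 if t.startswith(k, i):
--                     found.add(k)
--         return found
--
--     return not found_in(text1).isdisjoint(found_in(text2))
-- ===== Notes on version B (the rewrite author's own statement) =====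
-- stated objective: alternative
-- what changed: Replaces A's per-keyword 'in both texts' substring loop with a first-character dispatch table (dict char -> keyword list) and a single positional scan of each text collecting every occurring keyword via startswith, then tests the two collected sets for disjointness.
import Mathlib
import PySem

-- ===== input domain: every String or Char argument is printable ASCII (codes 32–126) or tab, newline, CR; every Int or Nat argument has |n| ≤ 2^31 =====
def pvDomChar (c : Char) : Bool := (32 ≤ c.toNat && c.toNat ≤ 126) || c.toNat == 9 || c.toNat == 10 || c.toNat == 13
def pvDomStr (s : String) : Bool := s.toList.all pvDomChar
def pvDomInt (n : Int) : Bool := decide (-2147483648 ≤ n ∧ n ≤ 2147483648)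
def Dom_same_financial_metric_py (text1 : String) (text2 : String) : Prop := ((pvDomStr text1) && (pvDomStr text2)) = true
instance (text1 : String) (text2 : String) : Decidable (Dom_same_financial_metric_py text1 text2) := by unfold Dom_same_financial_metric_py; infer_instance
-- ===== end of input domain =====

-- B replaces A's per-keyword substring loop with a first-character dispatch table and a
-- single left-to-right positional scan of each text collecting the keywords that occur (alternative, same cost).


-- ===== PORT A =====
def pvMetricKeywords : List String :=
  ["revenue", "sales", "inventory", "assets", "debt", "liabilities"]

-- A's for-loop with early return: first keyword contained in both lowered texts ⇒ True
def pvLoopA (t1 t2 : String) : List String → Bool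
  | [] => false
  | k :: rest =>
      if PySem.Str.isIn k t1 && PySem.Str.isIn k t2 then true
      else pvLoopA t1 t2 rest

def same_financial_metric_py (text1 : String) (text2 : String) : Bool :=
  pvLoopA (PySem.Str.lower text1) (PySem.Str.lower text2) pvMetricKeywords

-- ===== PORT B =====
-- by_first: setdefault(k[0], []).append(k) nets d[k[0]] = d.get(k[0], []) + [k], i.e. Dict.modify;
-- k[0] ported as headD ' ' — exact here: every keyword literal is nonempty
def pvByFirst : PySem.Dict Char (List String) :=
  pvMetricKeywords.foldl
    (fun d k => d.modify (k.toList.headD ' ') [] (fun l => l ++ [k]))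
    PySem.Dict.empty

-- found_in(text): scan positions i with char c, try only keywords dispatched on c;
-- t.startswith(k, i) ported as Chars.startswith on (t.drop i) — exact for 0 ≤ i (enumerate indices)
def pvFoundIn (text : String) : PySem.Set String :=
  let t := (PySem.Str.lower text).toList
  (PySem.List.enumerate t 0).foldl
    (fun found ic =>
      (pvByFirst.getD ic.2 []).foldl
        (fun found k =>
          if PySem.Chars.startswith (t.drop ic.1.toNat) k.toList then found.add k else found)
        found)
    PySem.Set.empty

def same_financial_metric_py_alt (text1 : String) (text2 : String) : Bool :=
  !(PySem.Set.isdisjoint (pvFoundIn text1) (pvFoundIn text2))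

-- ===== PRECONDITION & SPEC =====
def Spec_same_financial_metric_py (text1 : String) (text2 : String) (out : Bool) : Prop := out = same_financial_metric_py_alt text1 text2
instance (text1 : String) (text2 : String) (out : Bool) : Decidable (Spec_same_financial_metric_py text1 text2 out) := by unfold Spec_same_financial_metric_py; infer_instance

-- ===== CLAIM =====
def Claim_equal_same_financial_metric_py : Prop := ∀ (text1 : String) (text2 : String), Dom_same_financial_metric_py text1 text2 → Spec_same_financial_metric_py text1 text2 (same_financial_metric_py text1 text2)

-- ===== LEMMAS AND PROOFS =====
theorem byFirst_lit : pvByFirst = PySem.Dict.mk [('r', ["revenue"]), ('s', ["sales"]), ('i', ["inventory"]), ('a', ["assets"]), ('d', ["debt"]), ('l', ["liabilities"])] := by decide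

theorem mem_byFirst (k : String) (c : Char) :
    k ∈ pvByFirst.getD c [] ↔ k ∈ pvMetricKeywords ∧ k.toList.headD ' ' = c := by
  rw [byFirst_lit]
  simp only [PySem.Dict.getD, PySem.Dict.get?_mk_cons, pvMetricKeywords, List.mem_cons,
    List.not_mem_nil, or_false, beq_iff_eq]
  split_ifs with h1 h2 h3 h4 h5 h6 <;> (try subst_vars) <;>
    (try simp only [Option.getD_some, List.mem_cons, List.not_mem_nil,
      or_false, PySem.Dict.get?, List.find?, Option.map_none, Option.getD_none, false_iff]) <;>
    first
      | (constructor
         · rintro rfl; exact ⟨by tauto, by decide⟩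
         · rintro ⟨(rfl|rfl|rfl|rfl|rfl|rfl), hh⟩ <;> first | rfl | exact absurd hh (by decide))
      | (rintro ⟨(rfl|rfl|rfl|rfl|rfl|rfl), hh⟩ <;>
          first | exact h1 hh | exact h2 hh | exact h3 hh | exact h4 hh | exact h5 hh | exact h6 hh)

theorem mem_inner (ks : List String) (acc : PySem.Set String) (s : List Char) (k : String) :
    k ∈ ks.foldl (fun a k' => if PySem.Chars.startswith s k'.toList then a.add k' else a) acc ↔
      k ∈ acc ∨ (k ∈ ks ∧ PySem.Chars.startswith s k.toList = true) := by
  induction ks generalizing acc with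
  | nil => simp
  | cons x xs ih =>
    simp only [List.foldl_cons, ih, List.mem_cons]
    by_cases hx : PySem.Chars.startswith s x.toList = true
    · rw [if_pos hx, PySem.Set.mem_add]
      constructor
      · rintro ((h|rfl)|h)
        · exact Or.inl h
        · exact Or.inr ⟨Or.inl rfl, hx⟩
        · exact Or.inr ⟨Or.inr h.1, h.2⟩
      · rintro (h|⟨(rfl|h), hs⟩)
        · exact Or.inl (Or.inl h)
        · exact Or.inl (Or.inr rfl)
        · exact Or.inr ⟨h, hs⟩
    · rw [if_neg hx]
      constructor
      · rintro (h|h)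
        · exact Or.inl h
        · exact Or.inr ⟨Or.inr h.1, h.2⟩
      · rintro (h|⟨(rfl|h), hs⟩)
        · exact Or.inl h
        · exact absurd hs hx
        · exact Or.inr ⟨h, hs⟩

theorem mem_outer (t : List Char) (l : List (Int × Char)) (acc : PySem.Set String) (k : String) :
    k ∈ l.foldl (fun found ic =>
        (pvByFirst.getD ic.2 []).foldl
          (fun found k' =>
            if PySem.Chars.startswith (t.drop ic.1.toNat) k'.toList then found.add k' else found)
          found) acc ↔
      k ∈ acc ∨ ∃ ic ∈ l, k ∈ pvByFirst.getD ic.2 [] ∧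
        PySem.Chars.startswith (t.drop ic.1.toNat) k.toList = true := by
  induction l generalizing acc with
  | nil => simp
  | cons p ps ih =>
    simp only [List.foldl_cons, ih, mem_inner, List.mem_cons]
    constructor
    · rintro ((h|h)|⟨ic, hm, h⟩)
      · exact Or.inl h
      · exact Or.inr ⟨p, Or.inl rfl, h⟩
      · exact Or.inr ⟨ic, Or.inr hm, h⟩
    · rintro (h|⟨ic, (rfl|hm), h⟩)
      · exact Or.inl (Or.inl h)
      · exact Or.inl (Or.inr h)
      · exact Or.inr ⟨ic, hm, h⟩

theorem kw_nonempty : ∀ k ∈ pvMetricKeywords, k.toList ≠ [] := by decide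

theorem headD_eq_getElem (l : List Char) (h : l ≠ []) :
    l.headD ' ' = l[0]'(by cases l with | nil => exact absurd rfl h | cons a as => simp) := by
  cases l with
  | nil => exact absurd rfl h
  | cons a as => rfl

theorem mem_foundIn (k : String) (text : String) :
    k ∈ pvFoundIn text ↔ k ∈ pvMetricKeywords ∧ PySem.Str.isIn k (PySem.Str.lower text) = true := by
  unfold pvFoundIn
  rw [mem_outer]
  simp only [PySem.Set.empty, List.not_mem_nil, false_or, PySem.List.mem_enumerate_iff]
  rw [PySem.Str.isIn_iff_infix, ← PySem.Chars.isIn_iff_infix,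
    ← PySem.Chars.exists_prefix_drop_iff_isIn]
  set t := (PySem.Str.lower text).toList with ht
  constructor
  · rintro ⟨ic, ⟨j, hj, rfl⟩, hmem, hsw⟩
    rw [mem_byFirst] at hmem
    rw [PySem.Chars.startswith_iff] at hsw
    exact ⟨hmem.1, (0 + (j : Int)).toNat, hsw⟩
  · rintro ⟨hk, j, hpre⟩
    have hne : k.toList ≠ [] := kw_nonempty k hk
    obtain ⟨r, hr⟩ := hpre
    have hj : j < t.length := by
      by_contra hge
      have : t.drop j = [] := List.drop_eq_nil_of_le (le_of_not_gt (by simpa using hge))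
      rw [this] at hr
      exact hne (List.append_eq_nil_iff.mp hr).1
    refine ⟨((0 : Int) + (j : Int), t[j]), ⟨j, hj, rfl⟩, ?_, ?_⟩
    · rw [mem_byFirst]
      refine ⟨hk, ?_⟩
      have h0 : 0 < k.toList.length := List.length_pos_iff.mpr hne
      have hget : t[j] = k.toList[0]'h0 := by
        have h1 : (t.drop j)[0]'(by simp only [List.length_drop]; omega) = t[j] := by
          rw [List.getElem_drop]; simp
        rw [← h1]
        simp only [← hr]
        rw [List.getElem_append_left h0]
      rw [hget, headD_eq_getElem _ hne]
    · rw [PySem.Chars.startswith_iff]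
      have : ((0 : Int) + (j : Int), t[j]).1.toNat = j := by simp
      rw [this, ← hr]
      exact ⟨r, rfl⟩

theorem pvLoopA_eq_any (t1 t2 : String) (l : List String) :
    pvLoopA t1 t2 l = l.any (fun k => PySem.Str.isIn k t1 && PySem.Str.isIn k t2) := by
  induction l with
  | nil => rfl
  | cons k rest ih =>
    unfold pvLoopA
    rw [List.any_cons, ih]
    by_cases h : (PySem.Str.isIn k t1 && PySem.Str.isIn k t2) = true
    · rw [if_pos h, h, Bool.true_or]
    · rw [if_neg h, Bool.eq_false_iff.mpr h, Bool.false_or]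

theorem pv_eq (text1 text2 : String) :
    same_financial_metric_py text1 text2 = same_financial_metric_py_alt text1 text2 := by
  unfold same_financial_metric_py same_financial_metric_py_alt
  rw [pvLoopA_eq_any, Bool.eq_iff_iff]
  simp [PySem.Set.isdisjoint, mem_foundIn, List.any_eq_true]
  tauto

-- ===== VERDICT =====
theorem same_financial_metric_py_spec : Claim_equal_same_financial_metric_py := by
  intro t1 t2 _
  unfold Spec_same_financial_metric_py
  exact pv_eq t1 t2
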